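-- pv_equiv track=rewrite | github.com/RujYin/rosetta_script | structure_ranking/modelExtraction.py | fix_chain_C_residues
-- ===== SOURCE A (Python) =====
-- from collections import defaultdict
--
-- def fix_chain_C_residues(lines):
--     """Fix chain P→C, rename NH2→GLY NT at res_id=10 → res_id=9, and sort by res_id."""
--     residue_atoms = defaultdict(list)
--     for line in lines:
--         if not line.startswith(("ATOM", "HETATM")):
--             continue
--
--         chain_id = line[21]
--         resname = line[17:20].strip()
--         resseq = int(line[22:26].strip())
--
--         # Force chain ID to C
--         if chain_id == 'P':
--             line = line[:21] + 'C' + line[22:]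
--             chain_id = 'C'
--
--         # NH2 → GLY with NT atom and res_id 9
--         if resname == "NH2" and resseq == 10:
--             line = line[:12] + " NT " + line[16:]
--             line = line[:17] + "GLY" + line[20:]
--             line = line[:22] + "   9" + line[26:]
--             resseq = 9  # For sorting
--
--         residue_atoms[resseq].append(line)
--
--     # Sort by residue ID and flatten
--     sorted_lines = []
--     for res_id in sorted(residue_atoms):
--         sorted_lines.extend(residue_atoms[res_id])
--
--     # Count unique residues
--     unique_residues = {int(rid) for rid in residue_atoms}
--     return sorted_lines, len(unique_residues)
-- ===== SOURCE B (Python) =====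
-- def _record(line):
--     """One ATOM/HETATM line -> (final resseq, fixed line) built in a single concatenation."""
--     chain = 'C' if line[21] == 'P' else line[21]
--     resseq = int(line[22:26].strip())
--     if line[17:20].strip() == "NH2" and resseq == 10:
--         return 9, line[:12] + " NT " + line[16] + "GLY" + line[20] + chain + "   9" + line[26:]
--     return resseq, line[:21] + chain + line[22:]
--
--
-- def fix_chain_C_residues(lines):
--     """Fix chain P->C, rename NH2->GLY NT at res_id=10 -> res_id=9, and sort by res_id."""
--     records = [_record(line) for line in lines if line.startswith(("ATOM", "HETATM"))]
--     ordered = sorted(records, key=lambda t: t[0])  # stable: ties keep scan order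
--     return [line for _, line in ordered], len({r for r, _ in records})
-- ===== Notes on version B (the rewrite author's own statement) =====
-- stated objective: simpler
-- what changed: Replaces the dict-of-lists bucketing plus sorted-keys flattening with a flat (resseq, line) record list (each fixed line built in one concatenation) finished by a single stable sort and a set comprehension for the count.
import Mathlib
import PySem

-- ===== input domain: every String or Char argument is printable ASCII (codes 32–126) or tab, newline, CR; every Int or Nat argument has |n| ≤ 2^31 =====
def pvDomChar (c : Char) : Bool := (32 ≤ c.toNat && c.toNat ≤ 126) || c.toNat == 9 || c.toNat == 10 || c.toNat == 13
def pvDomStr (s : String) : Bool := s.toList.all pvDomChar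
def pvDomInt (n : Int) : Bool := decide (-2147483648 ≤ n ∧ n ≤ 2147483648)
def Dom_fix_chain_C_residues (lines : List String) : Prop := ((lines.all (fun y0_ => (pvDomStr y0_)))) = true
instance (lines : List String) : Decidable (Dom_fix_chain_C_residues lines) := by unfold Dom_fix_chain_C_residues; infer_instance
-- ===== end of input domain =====

-- B replaces A's dict-of-lists bucketing (flattened over sorted keys) with a flat list of
-- (resseq, line) records — each fixed line built in one concatenation — finished by a single
-- stable sort; return values only (neither Python mutates its argument).

-- ===== PORT A =====
def pvKeep (line : String) : Bool :=
  PySem.Str.startswith line "ATOM" || PySem.Str.startswith line "HETATM"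

-- `.getD` defaults stand where Python raises (IndexError on line[21], ValueError in int());
-- those inputs are excluded by Pre_ below.
def pvFix (cs : List Char) : Int × List Char :=
  let chain := (PySem.List.pyGet? cs 21).getD ' '
  let resname := PySem.Chars.strip (PySem.List.slice cs (some 17) (some 20))
  let resseq := (PySem.Int.ofChars? (PySem.Chars.strip (PySem.List.slice cs (some 22) (some 26)))).getD 0
  let cs := if chain == 'P' then PySem.List.slice cs none (some 21) ++ ['C'] ++ PySem.List.slice cs (some 22) none else cs
  if resname == "NH2".toList && resseq == 10 then
    let cs := PySem.List.slice cs none (some 12) ++ " NT ".toList ++ PySem.List.slice cs (some 16) none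
    let cs := PySem.List.slice cs none (some 17) ++ "GLY".toList ++ PySem.List.slice cs (some 20) none
    let cs := PySem.List.slice cs none (some 22) ++ "   9".toList ++ PySem.List.slice cs (some 26) none
    (9, cs)
  else
    (resseq, cs)

def pvFixS (line : String) : Int × String :=
  ((pvFix line.toList).1, String.ofList (pvFix line.toList).2)

def fix_chain_C_residues (lines : List String) : List String × Int :=
  let d : PySem.Dict Int (List String) :=
    lines.foldl (fun d line =>
      if pvKeep line then d.modify (pvFixS line).1 [] (fun x => x ++ [(pvFixS line).2]) else d)
      PySem.Dict.empty
  let sorted_lines := (PySem.List.sorted d.keys (fun k => k)).foldl (fun acc k => acc ++ d.getD k []) []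
  (sorted_lines, ((PySem.Set.ofList (d.keys.map (fun rid => rid))).length : Int))

-- ===== PORT B =====
-- Source B's `_record`: the fixed line is assembled in ONE concatenation (single chars read with
-- pyGet?; `.getD` defaults stand where Python raises, outside Pre_ below).
def pvRec (cs : List Char) : Int × List Char :=
  let chain := if (PySem.List.pyGet? cs 21).getD ' ' == 'P' then 'C' else (PySem.List.pyGet? cs 21).getD ' '
  let resseq := (PySem.Int.ofChars? (PySem.Chars.strip (PySem.List.slice cs (some 22) (some 26)))).getD 0
  if PySem.Chars.strip (PySem.List.slice cs (some 17) (some 20)) == "NH2".toList && resseq == 10 then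
    (9, PySem.List.slice cs none (some 12) ++ " NT ".toList ++ [(PySem.List.pyGet? cs 16).getD ' ']
          ++ "GLY".toList ++ [(PySem.List.pyGet? cs 20).getD ' '] ++ [chain]
          ++ "   9".toList ++ PySem.List.slice cs (some 26) none)
  else
    (resseq, PySem.List.slice cs none (some 21) ++ [chain] ++ PySem.List.slice cs (some 22) none)

def pvRecS (line : String) : Int × String :=
  ((pvRec line.toList).1, String.ofList (pvRec line.toList).2)

def fix_chain_C_residues_alt (lines : List String) : List String × Int :=
  let records : List (Int × String) :=
    (lines.filter (fun line =>
      PySem.Str.startswith line "ATOM" || PySem.Str.startswith line "HETATM")).map pvRecS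
  let ordered := PySem.List.sorted records (fun t => t.1)
  (ordered.map (fun t => t.2), ((PySem.Set.ofList (records.map (fun r => r.1))).length : Int))

-- ===== PRECONDITION & SPEC =====
-- Pre_ excludes exactly the inputs on which Python A raises: a kept (ATOM/HETATM) line
-- shorter than 22 characters (IndexError on line[21]) or whose columns 22:26 do not
-- parse as an int (ValueError); B raises there too.
def Pre_fix_chain_C_residues (lines : List String) : Prop :=
  ∀ line ∈ lines, pvKeep line = true →
    22 ≤ line.toList.length ∧
    (PySem.Int.ofChars? (PySem.Chars.strip (PySem.List.slice line.toList (some 22) (some 26)))).isSome = true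

instance (lines : List String) : Decidable (Pre_fix_chain_C_residues lines) := by
  unfold Pre_fix_chain_C_residues; infer_instance

def pvWitness_fix_chain_C_residues : List String := ["ATOM             GLY C   1"]

def Spec_fix_chain_C_residues (lines : List String) (out : List String × Int) : Prop :=
  out = fix_chain_C_residues_alt lines
instance (lines : List String) (out : List String × Int) : Decidable (Spec_fix_chain_C_residues lines out) := by
  unfold Spec_fix_chain_C_residues; infer_instance

-- ===== CLAIM (what is proved, stated in full; the proofs are below) =====
def Claim_equal_fix_chain_C_residues : Prop :=
  ∀ (lines : List String), Dom_fix_chain_C_residues lines → Pre_fix_chain_C_residues lines →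
    Spec_fix_chain_C_residues lines (fix_chain_C_residues lines)

-- ===== LEMMAS AND PROOFS =====

-- the two per-line transforms agree on every line long enough to reach column 21
set_option maxHeartbeats 2000000 in
theorem pvFix_eq_pvRec (cs : List Char) (h : 22 ≤ cs.length) : pvFix cs = pvRec cs := by
  have hto : ∀ (xs : List Char) (b : Nat), PySem.List.slice xs none (some (b : Int)) = xs.take b := by
    intro xs b; rw [PySem.List.slice_to xs (by positivity)]; norm_num
  have hfrom : ∀ (xs : List Char) (a : Nat), PySem.List.slice xs (some (a : Int)) none = xs.drop a := by
    intro xs a; rw [PySem.List.slice_from xs (by positivity)]; norm_num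
  have hab : ∀ (xs : List Char) (a b : Nat), PySem.List.slice xs (some (a : Int)) (some (b : Int)) = (xs.drop a).take (b - a) := by
    intro xs a b; rw [PySem.List.slice_toNat xs (by positivity) (by positivity)]; norm_num
  have hg : ∀ (n : Nat), PySem.List.pyGet? cs (n : Int) = cs[n]? := fun n => PySem.List.pyGet?_natCast cs n
  simp only [pvFix, pvRec]
  rw [show (21:Int) = ((21:Nat):Int) by norm_num] at *
  rw [show (22:Int) = ((22:Nat):Int) by norm_num] at *
  rw [show (26:Int) = ((26:Nat):Int) by norm_num] at *
  rw [show (17:Int) = ((17:Nat):Int) by norm_num] at *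
  rw [show (20:Int) = ((20:Nat):Int) by norm_num] at *
  rw [show (12:Int) = ((12:Nat):Int) by norm_num] at *
  rw [show (16:Int) = ((16:Nat):Int) by norm_num] at *
  simp only [hto, hfrom, hab, hg]
  obtain ⟨p, q, rfl, hp⟩ : ∃ p q, cs = p ++ q ∧ p.length = 22 :=
    ⟨cs.take 22, cs.drop 22, (List.take_append_drop 22 cs).symm, by simp [Nat.min_eq_left h]⟩
  rcases p with _|⟨c0,p⟩; · simp at hp
  rcases p with _|⟨c1,p⟩; · simp at hp
  rcases p with _|⟨c2,p⟩; · simp at hp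
  rcases p with _|⟨c3,p⟩; · simp at hp
  rcases p with _|⟨c4,p⟩; · simp at hp
  rcases p with _|⟨c5,p⟩; · simp at hp
  rcases p with _|⟨c6,p⟩; · simp at hp
  rcases p with _|⟨c7,p⟩; · simp at hp
  rcases p with _|⟨c8,p⟩; · simp at hp
  rcases p with _|⟨c9,p⟩; · simp at hp
  rcases p with _|⟨c10,p⟩; · simp at hp
  rcases p with _|⟨c11,p⟩; · simp at hp
  rcases p with _|⟨c12,p⟩; · simp at hp
  rcases p with _|⟨c13,p⟩; · simp at hp
  rcases p with _|⟨c14,p⟩; · simp at hp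
  rcases p with _|⟨c15,p⟩; · simp at hp
  rcases p with _|⟨c16,p⟩; · simp at hp
  rcases p with _|⟨c17,p⟩; · simp at hp
  rcases p with _|⟨c18,p⟩; · simp at hp
  rcases p with _|⟨c19,p⟩; · simp at hp
  rcases p with _|⟨c20,p⟩; · simp at hp
  rcases p with _|⟨c21,p⟩; · simp at hp
  rcases p with _|⟨c22,p⟩
  case cons => simp at hp
  simp only [List.cons_append, List.nil_append]
  by_cases hP : c21 = 'P' <;> split_ifs <;> simp_all

theorem pvFixS_eq_pvRecS (line : String) (h : 22 ≤ line.toList.length) : pvFixS line = pvRecS line := by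
  unfold pvFixS pvRecS
  rw [pvFix_eq_pvRec line.toList h]

-- the comparison `sorted` uses for key `Prod.fst`
def pvBf (a b : Int × String) : Bool := decide (a.1 < b.1)

-- the filtered, transformed record stream A's dict loop consumes
def pvRecs (lines : List String) : List (Int × String) := (lines.filter pvKeep).map pvFixS

theorem pv_insertBy_nil {α : Type} (bf : α → α → Bool) (x : α) :
    PySem.List.insertBy bf x [] = [x] := rfl

theorem pv_insertBy_cons {α : Type} (bf : α → α → Bool) (x y : α) (ys : List α) :
    PySem.List.insertBy bf x (y :: ys) =
      if bf x y then x :: y :: ys else y :: PySem.List.insertBy bf x ys := rfl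

theorem pv_insertBy_skip {α : Type} (bf : α → α → Bool) (x : α) (ys zs : List α)
    (h : ∀ y ∈ ys, bf x y = false) :
    PySem.List.insertBy bf x (ys ++ zs) = ys ++ PySem.List.insertBy bf x zs := by
  induction ys with
  | nil => simp
  | cons y ys ih =>
    simp only [List.cons_append, pv_insertBy_cons, h y (by simp)]
    simp [ih (fun y' hy' => h y' (by simp [hy']))]

theorem pv_insertBy_front {α : Type} (bf : α → α → Bool) (x : α) (zs : List α)
    (h : ∀ y ∈ zs, bf x y = true) :
    PySem.List.insertBy bf x zs = x :: zs := by
  cases zs with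
  | nil => rfl
  | cons y ys => simp [pv_insertBy_cons, h y (by simp)]

theorem pv_mem_insertBy {α : Type} (bf : α → α → Bool) (x a : α) (ys : List α) :
    a ∈ PySem.List.insertBy bf x ys ↔ a = x ∨ a ∈ ys := by
  induction ys with
  | nil => simp [pv_insertBy_nil]
  | cons y ys ih =>
    simp only [pv_insertBy_cons]
    split
    · simp
    · simp [ih]; tauto

-- inserting a record whose key already heads a block: it lands right after its block
theorem pv_insert_flatMap_mem (T : List Int) (g : Int → List (Int × String)) (p : Int × String)
    (hpw : T.Pairwise (· < ·))
    (hkey : ∀ k ∈ T, ∀ q ∈ g k, q.1 = k)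
    (hne : ∀ k ∈ T, g k ≠ [])
    (hmem : p.1 ∈ T) :
    PySem.List.insertBy pvBf p (T.flatMap g) =
      T.flatMap (fun k => g k ++ if p.1 == k then [p] else []) := by
  induction T with
  | nil => simp at hmem
  | cons k T ih =>
    rcases List.pairwise_cons.mp hpw with ⟨hlt, hpw'⟩
    by_cases hk : p.1 = k
    · have hskip : ∀ y ∈ g k, pvBf p y = false := by
        intro y hy
        have := hkey k (by simp) y hy
        simp [pvBf, this, hk]
      have hfront : ∀ y ∈ T.flatMap g, pvBf p y = true := by
        intro y hy
        rcases List.mem_flatMap.mp hy with ⟨k', hk', hy'⟩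
        have := hkey k' (by simp [hk']) y hy'
        simp [pvBf, this, hk]
        exact hlt k' hk'
      have hnotin : ∀ k' ∈ T, ¬ (p.1 == k') = true := by
        intro k' hk'
        have := hlt k' hk'
        simp [hk]; omega
      simp only [List.flatMap_cons, pv_insertBy_skip pvBf p _ _ hskip,
        pv_insertBy_front pvBf p _ hfront]
      have hcongr : (T.flatMap fun k' => g k' ++ if p.1 == k' then [p] else []) = T.flatMap g := by
        apply List.flatMap_congr
        intro k' hk'
        simp [hnotin k' hk']
      rw [hcongr]
      simp [hk]
    · have hmem' : p.1 ∈ T := by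
        rcases List.mem_cons.mp hmem with h | h
        · exact absurd h hk
        · exact h
      have hklt : k < p.1 := hlt p.1 hmem'
      have hskip : ∀ y ∈ g k, pvBf p y = false := by
        intro y hy
        have := hkey k (by simp) y hy
        simp [pvBf, this]; omega
      simp only [List.flatMap_cons, pv_insertBy_skip pvBf p _ _ hskip]
      rw [ih hpw' (fun k hk q hq => hkey k (by simp [hk]) q hq) (fun k hk => hne k (by simp [hk])) hmem']
      have : ¬ (p.1 == k) = true := by simp; omega
      simp [this]

-- inserting a record with a fresh key: it forms a new block where its key sorts
theorem pv_insert_flatMap_new (T : List Int) (g : Int → List (Int × String)) (p : Int × String)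
    (hpw : T.Pairwise (· < ·))
    (hkey : ∀ k ∈ T, ∀ q ∈ g k, q.1 = k)
    (hne : ∀ k ∈ T, g k ≠ [])
    (hmem : p.1 ∉ T) :
    PySem.List.insertBy pvBf p (T.flatMap g) =
      (PySem.List.insertBy (fun a b => decide (a < b)) p.1 T).flatMap
        (fun k => if k == p.1 then [p] else g k) := by
  induction T with
  | nil => simp [pv_insertBy_nil]
  | cons k T ih =>
    rcases List.pairwise_cons.mp hpw with ⟨hlt, hpw'⟩
    have hkne : p.1 ≠ k := by intro h; exact hmem (by simp [h])
    by_cases hplt : p.1 < k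
    · have hfront : ∀ y ∈ (k :: T).flatMap g, pvBf p y = true := by
        intro y hy
        rcases List.mem_flatMap.mp hy with ⟨k', hk', hy'⟩
        have hk'' := hkey k' hk' y hy'
        rcases List.mem_cons.mp hk' with h | h
        · simp [pvBf, hk'', h]; omega
        · have := hlt k' h
          simp [pvBf, hk'']; omega
      rw [pv_insertBy_front pvBf p _ hfront, pv_insertBy_cons]
      have hd : (decide (p.1 < k)) = true := by simp [hplt]
      have hT : (T.flatMap fun k' => if k' = p.1 then [p] else g k') = T.flatMap g := by
        apply List.flatMap_congr
        intro k' hk'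
        have : k' ≠ p.1 := by
          intro h; exact hmem (List.mem_cons.mpr (Or.inr (h ▸ hk')))
        simp [this]
      simp [hd, hT, Ne.symm hkne]
    · have hklt : k < p.1 := by omega
      have hskip : ∀ y ∈ g k, pvBf p y = false := by
        intro y hy
        have := hkey k (by simp) y hy
        simp [pvBf, this]; omega
      rw [pv_insertBy_cons]
      simp only [List.flatMap_cons, pv_insertBy_skip pvBf p _ _ hskip]
      have hd : (decide (p.1 < k)) = false := by simp; omega
      simp only [hd, Bool.false_eq_true, if_false, List.flatMap_cons]
      have hknp : ¬ (k == p.1) = true := by simp; omega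
      rw [ih hpw' (fun k hk q hq => hkey k (by simp [hk]) q hq) (fun k hk => hne k (by simp [hk]))
        (fun h => hmem (by simp [h]))]
      simp [hknp]

theorem pv_sorted_append_singleton {α κ : Type} [LT κ] [DecidableLT κ] (xs : List α) (p : α)
    (key : α → κ) :
    PySem.List.sorted (xs ++ [p]) key =
      PySem.List.insertBy (fun a b => decide (key a < key b)) p (PySem.List.sorted xs key) := by
  rw [PySem.List.sorted_eq_foldl_insertBy, PySem.List.sorted_eq_foldl_insertBy, List.foldl_append]
  rfl

theorem pv_sorted_fst_append (l : List (Int × String)) (p : Int × String) :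
    PySem.List.sorted (l ++ [p]) (fun t => t.1) =
      PySem.List.insertBy pvBf p (PySem.List.sorted l (fun t => t.1)) := by
  rw [pv_sorted_append_singleton]; rfl

theorem pv_sorted_id_append (S : List Int) (x : Int) :
    PySem.List.sorted (S ++ [x]) (fun k => k) =
      PySem.List.insertBy (fun a b => decide (a < b)) x (PySem.List.sorted S (fun k => k)) := by
  rw [pv_sorted_append_singleton]

-- the heart of the equivalence: a stable sort by key equals the concatenation of the
-- original-order key groups taken in sorted key order
theorem pv_sort_groups (l : List (Int × String)) :
    PySem.List.sorted l (fun t => t.1) =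
      (PySem.List.sorted (PySem.Set.ofList (l.map (fun t => t.1))) (fun k => k)).flatMap
        (fun k => l.filter (fun q => q.1 == k)) := by
  induction l using List.reverseRecOn with
  | nil => rfl
  | append_singleton l p ih =>
    have hT := PySem.List.sorted_ofList_pairwise_lt (l.map (fun t => t.1))
    have hkey : ∀ k ∈ PySem.List.sorted (PySem.Set.ofList (l.map (fun t => t.1))) (fun x => x),
        ∀ q ∈ l.filter (fun q => q.1 == k), q.1 = k := by
      intro k _ q hq
      exact beq_iff_eq.mp (List.mem_filter.mp hq).2
    have hne : ∀ k ∈ PySem.List.sorted (PySem.Set.ofList (l.map (fun t => t.1))) (fun x => x),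
        l.filter (fun q => q.1 == k) ≠ [] := by
      intro k hk hnil
      have hkm : k ∈ l.map (fun t => t.1) :=
        (PySem.Set.mem_ofList _ _).mp ((PySem.List.mem_sorted _ _ _ _).mp hk)
      rcases List.mem_map.mp hkm with ⟨q, hq, hq1⟩
      rw [List.filter_eq_nil_iff] at hnil
      exact hnil q hq (by simp [hq1])
    rw [pv_sorted_fst_append, ih]
    have hmap : (l ++ [p]).map (fun t => t.1) = l.map (fun t => t.1) ++ [p.1] := by simp
    rw [hmap, PySem.Set.ofList_append_singleton]
    by_cases hmem : p.1 ∈ PySem.Set.ofList (l.map (fun t => t.1))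
    · rw [PySem.Set.add_of_mem hmem]
      have hmemT : p.1 ∈ PySem.List.sorted (PySem.Set.ofList (l.map (fun t => t.1))) (fun x => x) :=
        (PySem.List.mem_sorted _ _ _ _).mpr hmem
      rw [pv_insert_flatMap_mem _ _ p hT hkey hne hmemT]
      apply List.flatMap_congr
      intro k hk
      simp [List.filter_append, List.filter_singleton]
    · rw [PySem.Set.add_of_not_mem hmem, pv_sorted_id_append]
      have hmemT : p.1 ∉ PySem.List.sorted (PySem.Set.ofList (l.map (fun t => t.1))) (fun x => x) :=
        fun h => hmem ((PySem.List.mem_sorted _ _ _ _).mp h)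
      rw [pv_insert_flatMap_new _ _ p hT hkey hne hmemT]
      apply List.flatMap_congr
      intro k hk
      rcases (pv_mem_insertBy _ _ _ _).mp hk with h | h
      · have hfilt : l.filter (fun q => q.1 == p.1) = [] := by
          rw [List.filter_eq_nil_iff]
          intro q hq hbeq
          exact hmem ((PySem.Set.mem_ofList _ _).mpr
            (List.mem_map.mpr ⟨q, hq, beq_iff_eq.mp hbeq⟩))
        simp [h, List.filter_append, hfilt]
      · have hkp : k ≠ p.1 := fun he => hmemT (he ▸ h)
        simp [List.filter_append, hkp, Ne.symm hkp]

-- assembling A's dict pipeline into B's sort pipeline, over a common record stream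
def pvDictOf (l : List (Int × String)) : PySem.Dict Int (List String) :=
  l.foldl (fun d p => d.modify p.1 [] (fun x => x ++ [p.2])) PySem.Dict.empty

theorem pv_main (l : List (Int × String)) :
    ((PySem.List.sorted (pvDictOf l).keys (fun k => k)).foldl
        (fun acc k => acc ++ (pvDictOf l).getD k []) [],
      ((PySem.Set.ofList ((pvDictOf l).keys.map (fun rid => rid))).length : Int)) =
    ((PySem.List.sorted l (fun t => t.1)).map (fun t => t.2),
      ((PySem.Set.ofList (l.map (fun t => t.1))).length : Int)) := by
  have hkeys : (pvDictOf l).keys = PySem.Set.ofList (l.map (fun t => t.1)) := by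
    unfold pvDictOf
    rw [PySem.Dict.keys_foldl_modify_key l (fun p => p.1) [] (fun _ p => (fun x => x ++ [p.2]))]
    rw [PySem.Dict.keys_empty, PySem.Set.update_nil_left]
  have hgetD : ∀ k, (pvDictOf l).getD k [] = (l.filter (fun q => q.1 == k)).map (fun t => t.2) := by
    intro k
    unfold pvDictOf
    rw [PySem.Dict.getD_foldl_modify_append l PySem.Dict.empty k]
    rfl
  refine Prod.ext ?_ ?_
  · show (PySem.List.sorted (pvDictOf l).keys (fun k => k)).foldl
        (fun acc k => acc ++ (pvDictOf l).getD k []) [] = _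
    rw [PySem.List.foldl_append_eq_flatMap (fun k => (pvDictOf l).getD k [])]
    rw [List.nil_append, hkeys, pv_sort_groups l, List.map_flatMap]
    apply List.flatMap_congr
    intro k _
    exact hgetD k
  · show ((PySem.Set.ofList ((pvDictOf l).keys.map (fun rid => rid))).length : Int) = _
    rw [hkeys, List.map_id', PySem.Set.ofList_ofList]

theorem pv_dict_fold (lines : List String) (d : PySem.Dict Int (List String)) :
    lines.foldl (fun d line =>
        if pvKeep line then d.modify (pvFixS line).1 [] (fun x => x ++ [(pvFixS line).2]) else d) d =
      (pvRecs lines).foldl (fun d p => d.modify p.1 [] (fun x => x ++ [p.2])) d := by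
  unfold pvRecs
  rw [List.foldl_map, List.foldl_filter]

-- under Pre_, B's record stream is A's record stream
theorem pv_records_eq (lines : List String) (hpre : Pre_fix_chain_C_residues lines) :
    (lines.filter (fun line =>
        PySem.Str.startswith line "ATOM" || PySem.Str.startswith line "HETATM")).map pvRecS =
      pvRecs lines := by
  unfold pvRecs
  have hf : (fun line => PySem.Str.startswith line "ATOM" || PySem.Str.startswith line "HETATM")
      = pvKeep := rfl
  rw [hf]
  apply List.map_congr_left
  intro l hl
  exact (pvFixS_eq_pvRecS l
    (hpre l (List.mem_of_mem_filter hl) (List.of_mem_filter hl)).1).symm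

-- ===== VERDICT (by name: the statement is the Claim_ definition above) =====
theorem fix_chain_C_residues_spec : Claim_equal_fix_chain_C_residues := by
  intro lines _ hpre
  show fix_chain_C_residues lines = fix_chain_C_residues_alt lines
  unfold fix_chain_C_residues fix_chain_C_residues_alt
  rw [pv_dict_fold lines PySem.Dict.empty, pv_records_eq lines hpre]
  exact pv_main (pvRecs lines)
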